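-- pv_equiv track=rewrite | github.com/mnaoumov/mathdoku-ocr-ppt-generator | ocr_mathdoku.py | _group_cages
-- ===== SOURCE A (Python) =====
-- def _group_cages(
--     n: int,
--     h_thick: dict[tuple[int, int], bool],
--     v_thick: dict[tuple[int, int], bool],
-- ) -> list[list[tuple[int, int]]]:
--     parent: dict[tuple[int, int], tuple[int, int]] = {
--         (r, c): (r, c) for r in range(n) for c in range(n)
--     }
--
--     def find(x: tuple[int, int]) -> tuple[int, int]:
--         while parent[x] != x:
--             parent[x] = parent[parent[x]]
--             x = parent[x]
--         return x
--
--     def union(a: tuple[int, int], b: tuple[int, int]) -> None: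
--         ra, rb = find(a), find(b)
--         if ra != rb:
--             parent[rb] = ra
--
--     for r in range(n):
--         for c in range(n):
--             if c + 1 < n and not v_thick.get((r, c + 1), True):
--                 union((r, c), (r, c + 1))
--             if r + 1 < n and not h_thick.get((r + 1, c), True):
--                 union((r, c), (r + 1, c))
--
--     groups: dict[tuple[int, int], list[tuple[int, int]]] = {}
--     for r in range(n):
--         for c in range(n):
--             groups.setdefault(find((r, c)), []).append((r, c))
--     return [sorted(cells) for cells in groups.values()]
-- ===== SOURCE B (Python) =====
-- def _group_cages(
--     n: int,
--     h_thick: dict[tuple[int, int], bool],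
--     v_thick: dict[tuple[int, int], bool],
-- ) -> list[list[tuple[int, int]]]:
--     # Flat cage-label table merged by relabelling, instead of a union-find forest.
--     label: dict[tuple[int, int], tuple[int, int]] = {}
--     members: dict[tuple[int, int], list[tuple[int, int]]] = {}
--     for r in range(n):
--         for c in range(n):
--             label[(r, c)] = (r, c)
--             members[(r, c)] = [(r, c)]
--
--     def merge(a: tuple[int, int], b: tuple[int, int]) -> None:
--         la, lb = label[a], label[b]
--         if la != lb:
--             for cell in members[lb]:
--                 label[cell] = la
--             members[la].extend(members[lb])
--             del members[lb]
--
--     for r in range(n):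
--         for c in range(n):
--             if c + 1 < n and not v_thick.get((r, c + 1), True):
--                 merge((r, c), (r, c + 1))
--             if r + 1 < n and not h_thick.get((r + 1, c), True):
--                 merge((r, c), (r + 1, c))
--
--     groups: dict[tuple[int, int], list[tuple[int, int]]] = {}
--     for cell, lab in label.items():
--         groups.setdefault(lab, []).append(cell)
--     return [sorted(cells) for cells in groups.values()]
-- ===== Notes on version B (the rewrite author's own statement) =====
-- stated objective: alternative
-- what changed: Replaces the union-find forest (parent pointers, path-compressing find, union) with a flat cell-to-cage-label table merged by relabelling the absorbed cage's member list, so find/union and the parent indirection disappear entirely.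
import Mathlib
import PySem

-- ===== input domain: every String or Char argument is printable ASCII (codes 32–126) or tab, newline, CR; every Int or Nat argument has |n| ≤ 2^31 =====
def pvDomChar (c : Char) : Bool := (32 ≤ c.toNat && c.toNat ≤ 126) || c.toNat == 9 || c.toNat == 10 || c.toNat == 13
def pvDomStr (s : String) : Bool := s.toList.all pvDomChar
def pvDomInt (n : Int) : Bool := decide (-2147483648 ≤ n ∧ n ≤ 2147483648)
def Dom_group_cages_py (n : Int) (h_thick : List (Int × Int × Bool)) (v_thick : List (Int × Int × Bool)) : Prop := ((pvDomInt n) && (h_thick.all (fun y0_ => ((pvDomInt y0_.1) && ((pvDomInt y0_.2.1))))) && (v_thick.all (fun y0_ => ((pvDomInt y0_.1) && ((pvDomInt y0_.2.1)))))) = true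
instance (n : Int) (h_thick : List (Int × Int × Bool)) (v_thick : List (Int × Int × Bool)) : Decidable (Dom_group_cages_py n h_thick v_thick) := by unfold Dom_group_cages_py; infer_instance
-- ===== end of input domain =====

-- B replaces A's union-find forest (path compression + find/union) by a flat cage-label table
-- merged by relabelling with per-cage member lists: a different algorithm of similar cost ("alternative").

-- shared helpers for both ports: the input dicts and the grid cell list
-- d.get((r, c), True) on the association-list dict: first match, default True
def thickGet (d : List (Int × Int × Bool)) (r c : Int) : Bool :=
  match d.find? (fun e => e.1 == r && e.2.1 == c) with
  | some e => e.2.2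
  | none => true

-- the grid cells (r, c), r in range(n), c in range(n), in row-major order
def pvCells (n : Int) : List (Int × Int) :=
  (PySem.List.pyRange 0 n 1).flatMap (fun r => (PySem.List.pyRange 0 n 1).map (fun c => (r, c)))

-- groups.setdefault(k, []).append(x) on an insertion-ordered association list
def pushGroup (gs : List ((Int × Int) × List (Int × Int))) (k x : Int × Int) :
    List ((Int × Int) × List (Int × Int)) :=
  match gs with
  | [] => [(k, [x])]
  | kv :: t => if kv.1 = k then (kv.1, kv.2 ++ [x]) :: t else kv :: pushGroup t k x

-- ===== PORT A =====
-- A's parent dict has exactly the grid cells as keys and is only read/written at grid cells,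
-- so it is carried as its lookup function (KeyError never occurs). The while-loop of find runs
-- on fuel; A calls it with fuel n*n+1, which the forest invariant proves sufficient below.
def findA : Nat → ((Int × Int) → (Int × Int)) → (Int × Int) →
    ((Int × Int) × ((Int × Int) → (Int × Int)))
  | 0, p, x => (x, p)                    -- fuel exhausted: unreachable (proved below)
  | fuel+1, p, x =>
    let px := p x
    if px = x then (x, p)
    else
      let g := p px                       -- parent[x] = parent[parent[x]]
      findA fuel (fun y => if y = x then g else p y) g    -- x = parent[x]

def unionA (F : Nat) (p : (Int × Int) → (Int × Int)) (a b : Int × Int) :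
    (Int × Int) → (Int × Int) :=
  let r1 := findA F p a
  let r2 := findA F r1.2 b
  if r1.1 ≠ r2.1 then (fun y => if y = r2.1 then r1.1 else r2.2 y) else r2.2

-- one iteration of A's edge loop body at cell rc
def stepA (n : Int) (h_thick v_thick : List (Int × Int × Bool)) (F : Nat)
    (p : (Int × Int) → (Int × Int)) (rc : Int × Int) : (Int × Int) → (Int × Int) :=
  let p1 := if rc.2 + 1 < n ∧ thickGet v_thick rc.1 (rc.2 + 1) = false then
      unionA F p (rc.1, rc.2) (rc.1, rc.2 + 1) else p
  if rc.1 + 1 < n ∧ thickGet h_thick (rc.1 + 1) rc.2 = false then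
      unionA F p1 (rc.1, rc.2) (rc.1 + 1, rc.2) else p1

def group_cages_py (n : Int) (h_thick : List (Int × Int × Bool))
    (v_thick : List (Int × Int × Bool)) : List (List (Int × Int)) :=
  let F : Nat := n.toNat * n.toNat + 1
  let p1 := (pvCells n).foldl (stepA n h_thick v_thick F) (fun y => y)
  let st := (pvCells n).foldl
      (fun (s : List ((Int × Int) × List (Int × Int)) × ((Int × Int) → (Int × Int))) x =>
        let r := findA F s.2 x
        (pushGroup s.1 r.1 x, r.2))
      ([], p1)
  st.1.map (fun kv => PySem.List.sorted2 kv.2 (·.1) (·.2))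

-- ===== PORT B =====
-- B's label dict also has exactly the grid cells as keys (values only are updated), so it too
-- is carried as its lookup function; its items() iterate in key-insertion order = pvCells n.
-- members is an insertion-ordered association list label ↦ list of cells.
-- members[lb]; lb is always a live key (KeyError never occurs)
def membGet (m : List ((Int × Int) × List (Int × Int))) (k : Int × Int) : List (Int × Int) :=
  match m with
  | [] => []
  | kv :: t => if kv.1 = k then kv.2 else membGet t k

-- members[la].extend(xs)
def membExtend (m : List ((Int × Int) × List (Int × Int))) (k : Int × Int)
    (xs : List (Int × Int)) : List ((Int × Int) × List (Int × Int)) :=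
  match m with
  | [] => []
  | kv :: t => if kv.1 = k then (kv.1, kv.2 ++ xs) :: t else kv :: membExtend t k xs

-- del members[lb]
def membDel (m : List ((Int × Int) × List (Int × Int))) (k : Int × Int) :
    List ((Int × Int) × List (Int × Int)) :=
  match m with
  | [] => []
  | kv :: t => if kv.1 = k then t else kv :: membDel t k

-- B's merge(a, b): relabel lb's member cells to la, move them into la's list, drop key lb
def mergeB (st : ((Int × Int) → (Int × Int)) × List ((Int × Int) × List (Int × Int)))
    (a b : Int × Int) :
    ((Int × Int) → (Int × Int)) × List ((Int × Int) × List (Int × Int)) :=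
  let la := st.1 a
  let lb := st.1 b
  if la ≠ lb then
    let mlb := membGet st.2 lb
    (mlb.foldl (fun f cell => fun y => if y = cell then la else f y) st.1,
     membDel (membExtend st.2 la mlb) lb)
  else st

-- one iteration of B's edge loop body at cell rc
def stepB (n : Int) (h_thick v_thick : List (Int × Int × Bool))
    (st : ((Int × Int) → (Int × Int)) × List ((Int × Int) × List (Int × Int)))
    (rc : Int × Int) :
    ((Int × Int) → (Int × Int)) × List ((Int × Int) × List (Int × Int)) :=
  let st1 := if rc.2 + 1 < n ∧ thickGet v_thick rc.1 (rc.2 + 1) = false then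
      mergeB st (rc.1, rc.2) (rc.1, rc.2 + 1) else st
  if rc.1 + 1 < n ∧ thickGet h_thick (rc.1 + 1) rc.2 = false then
      mergeB st1 (rc.1, rc.2) (rc.1 + 1, rc.2) else st1

def group_cages_py_alt (n : Int) (h_thick : List (Int × Int × Bool))
    (v_thick : List (Int × Int × Bool)) : List (List (Int × Int)) :=
  let st := (pvCells n).foldl (stepB n h_thick v_thick)
      ((fun y => y), (pvCells n).map (fun x => (x, [x])))
  let gs := (pvCells n).foldl (fun gs x => pushGroup gs (st.1 x) x) []
  gs.map (fun kv => PySem.List.sorted2 kv.2 (·.1) (·.2))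

-- ===== PRECONDITION & SPEC =====
def Spec_group_cages_py (n : Int) (h_thick : List (Int × Int × Bool)) (v_thick : List (Int × Int × Bool)) (out : List (List (Int × Int))) : Prop := out = group_cages_py_alt n h_thick v_thick
instance (n : Int) (h_thick : List (Int × Int × Bool)) (v_thick : List (Int × Int × Bool)) (out : List (List (Int × Int))) : Decidable (Spec_group_cages_py n h_thick v_thick out) := by unfold Spec_group_cages_py; infer_instance

-- ===== CLAIM (what is proved, stated in full; the proofs are below) =====
def Claim_equal_group_cages_py : Prop := ∀ (n : Int) (h_thick : List (Int × Int × Bool)) (v_thick : List (Int × Int × Bool)), Dom_group_cages_py n h_thick v_thick → Spec_group_cages_py n h_thick v_thick (group_cages_py n h_thick v_thick)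

-- ===== LEMMAS AND PROOFS =====

theorem mem_pvCells {n : Int} {x : Int × Int} :
    x ∈ pvCells n ↔ 0 ≤ x.1 ∧ x.1 < n ∧ 0 ≤ x.2 ∧ x.2 < n := by
  simp [pvCells, List.mem_flatMap, PySem.List.mem_pyRange_one, List.mem_map]
  constructor
  · rintro ⟨r, ⟨h1, h2⟩, c, ⟨h3, h4⟩, rfl⟩; exact ⟨h1, h2, h3, h4⟩
  · rintro ⟨h1, h2, h3, h4⟩; exact ⟨x.1, ⟨h1, h2⟩, x.2, ⟨h3, h4⟩, rfl⟩

theorem nodup_pvCells (n : Int) : (pvCells n).Nodup := by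
  rw [pvCells, List.nodup_flatMap]
  constructor
  · intro r _
    exact (PySem.List.nodup_pyRange_one 0 n).map (fun a b h => by simpa using congrArg Prod.snd h)
  · refine List.Pairwise.imp ?_ ((PySem.List.nodup_pyRange_one 0 n).pairwise_of_forall_ne (fun a _ b _ h => h))
    intro a b hab
    simp only [Function.onFun, List.Disjoint]
    rintro p hp hq
    simp only [List.mem_map] at hp hq
    obtain ⟨c, _, rfl⟩ := hp
    obtain ⟨c', _, h⟩ := hq
    exact hab (by simpa using (congrArg Prod.fst h).symm)

theorem length_pvCells (n : Int) : (pvCells n).length = n.toNat * n.toNat := by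
  simp [pvCells, List.length_flatMap, PySem.List.length_pyRange_one]

def RootInv (n : Int) (p lab : (Int × Int) → (Int × Int)) (d : (Int × Int) → Nat) : Prop :=
  ∀ x ∈ pvCells n,
    p x ∈ pvCells n ∧ lab (p x) = lab x ∧ (p x = x → lab x = x) ∧
    lab x ∈ pvCells n ∧ p (lab x) = lab x ∧ lab (lab x) = lab x ∧
    (p x ≠ x → d (p x) < d x) ∧
    d x < (pvCells n).countP (fun y => decide (lab y = lab x))

def MemInv (n : Int) (lab : (Int × Int) → (Int × Int))
    (mem : List ((Int × Int) × List (Int × Int))) : Prop :=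
  (mem.map Prod.fst).Nodup ∧
  (∀ kv ∈ mem, kv.1 ∈ pvCells n ∧ lab kv.1 = kv.1) ∧
  (∀ x ∈ pvCells n, lab x ∈ mem.map Prod.fst) ∧
  (∀ kv ∈ mem, ∀ y, y ∈ kv.2 ↔ (y ∈ pvCells n ∧ lab y = kv.1))
theorem find_ok {n : Int} {lab : (Int × Int) → (Int × Int)} {d : (Int × Int) → Nat} :
    ∀ (fuel : Nat) (p : (Int × Int) → (Int × Int)) (x : Int × Int),
      RootInv n p lab d → x ∈ pvCells n → d x < fuel →
      (findA fuel p x).1 = lab x ∧ RootInv n (findA fuel p x).2 lab d := by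
  intro fuel
  induction fuel with
  | zero => intro p x _ _ h; omega
  | succ fuel ih =>
    intro p x hR hx hfuel
    obtain ⟨hpx, hlabpx, hroot, hlabx, hplab, hlablab, hdec, hcnt⟩ := hR x hx
    by_cases hfix : p x = x
    · simpa [findA, hfix] using ⟨(hroot hfix).symm, hR⟩
    · obtain ⟨hppx, hlabppx, hrootpx, _, _, _, hdecpx, _⟩ := hR (p x) hpx
      set g := p (p x) with hg
      set p' := fun y => if y = x then g else p y with hp'
      have hp'x : p' x = g := by simp [hp']
      have hp'ne : ∀ z, z ≠ x → p' z = p z := by intro z hz; simp [hp', hz]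
      have hlabxx : lab x ≠ x := by
        intro h; apply hfix; rw [h] at hplab; exact hplab
      have hdgx : d g < d x := by
        by_cases hr2 : g = p x
        · rw [hr2]; exact hdec hfix
        · have h1 := hdecpx hr2; have h2 := hdec hfix; omega
      have hgx : g ≠ x := by
        intro h; have := hdgx; rw [h] at this; omega
      have hdg : d g < fuel := by omega
      have hlabg : lab g = lab x := by rw [hg, hlabppx, hlabpx]
      have hR' : RootInv n p' lab d := by
        intro z hz
        obtain ⟨h1, h2, h3, h4, h5, h6, h7, h8⟩ := hR z hz
        by_cases hzx : z = x
        · subst hzx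
          rw [hp'x]
          have hlz : lab z ≠ z := hlabxx
          refine ⟨hppx, by rw [hlabg], fun h => absurd h hgx, h4, ?_, h6, fun _ => hdgx, h8⟩
          rw [hp'ne _ hlz]; exact h5
        · have hlzx : lab z ≠ x := by
            intro h; apply hfix
            rw [h] at h5; exact h5
          rw [hp'ne _ hzx, hp'ne _ hlzx]
          exact ⟨h1, h2, h3, h4, h5, h6, h7, h8⟩
      have hstep : findA (fuel+1) p x = findA fuel p' g := by
        simp [findA, hfix, hp', hg]
      rw [hstep]
      have := ih p' g hR' hppx hdg
      exact ⟨by rw [this.1, hlabg], this.2⟩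
theorem relabel_fold (mlb : List (Int×Int)) (la : Int×Int) :
    ∀ (lab : (Int×Int) → (Int×Int)) (y : Int×Int),
      mlb.foldl (fun f cell => fun y => if y = cell then la else f y) lab y
        = if y ∈ mlb then la else lab y := by
  induction mlb with
  | nil => simp
  | cons c t ih =>
    intro lab y
    simp only [List.foldl_cons]
    rw [ih]
    by_cases h1 : y ∈ t
    · simp [h1]
    · by_cases h2 : y = c <;> simp [h1, h2]

theorem membGet_eq : ∀ (m : List ((Int×Int) × List (Int×Int))) (kv : (Int×Int) × List (Int×Int)),
    kv ∈ m → (m.map Prod.fst).Nodup → membGet m kv.1 = kv.2 := by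
  intro m
  induction m with
  | nil => intro kv h; simp at h
  | cons hd t ih =>
    intro kv hkv hnd
    simp only [List.map_cons, List.nodup_cons] at hnd
    rcases List.mem_cons.1 hkv with h | h
    · subst h; simp [membGet]
    · have hne : hd.1 ≠ kv.1 := by
        intro he; exact hnd.1 (he ▸ List.mem_map_of_mem h)
      simp only [membGet, if_neg hne]
      exact ih kv h hnd.2

theorem map_fst_membExtend : ∀ (m : List ((Int×Int) × List (Int×Int))) k xs,
    (membExtend m k xs).map Prod.fst = m.map Prod.fst := by
  intro m k xs
  induction m with
  | nil => rfl
  | cons hd t ih =>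
    by_cases h : hd.1 = k <;> simp [membExtend, h, ih]

theorem map_fst_membDel : ∀ (m : List ((Int×Int) × List (Int×Int))) k,
    (membDel m k).map Prod.fst = (m.map Prod.fst).erase k := by
  intro m k
  induction m with
  | nil => rfl
  | cons hd t ih =>
    by_cases h : hd.1 = k
    · simp [membDel, h, List.erase_cons_head]
    · simp [membDel, h, List.erase_cons_tail, ih]

theorem mem_membDel_iff {m : List ((Int×Int) × List (Int×Int))} {k kv}
    (hnd : (m.map Prod.fst).Nodup) : kv ∈ membDel m k ↔ kv ∈ m ∧ kv.1 ≠ k := by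
  induction m with
  | nil => simp [membDel]
  | cons hd t ih =>
    simp only [List.map_cons, List.nodup_cons] at hnd
    by_cases h : hd.1 = k
    · subst h
      simp only [membDel, List.mem_cons]
      constructor
      · intro hm
        refine ⟨Or.inr hm, ?_⟩
        intro he; exact hnd.1 (he ▸ List.mem_map_of_mem hm)
      · rintro ⟨h1 | h1, h2⟩
        · exact absurd (h1 ▸ rfl) h2
        · exact h1
    · simp only [membDel, if_neg h, List.mem_cons, ih hnd.2]
      constructor
      · rintro (rfl | ⟨h1, h2⟩)
        · exact ⟨Or.inl rfl, h⟩
        · exact ⟨Or.inr h1, h2⟩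
      · rintro ⟨rfl | h1, h2⟩
        · exact Or.inl rfl
        · exact Or.inr ⟨h1, h2⟩

theorem mem_membExtend_iff {m : List ((Int×Int) × List (Int×Int))} {k kv xs}
    (hnd : (m.map Prod.fst).Nodup) :
    kv ∈ membExtend m k xs ↔ ((kv.1 ≠ k ∧ kv ∈ m) ∨ ∃ v, (k, v) ∈ m ∧ kv = (k, v ++ xs)) := by
  induction m with
  | nil => simp [membExtend]
  | cons hd t ih =>
    simp only [List.map_cons, List.nodup_cons] at hnd
    have hunf : membExtend (hd :: t) k xs
        = if hd.1 = k then (hd.1, hd.2 ++ xs) :: t else hd :: membExtend t k xs := rfl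
    by_cases h : hd.1 = k
    · subst h
      rw [hunf, if_pos rfl]
      have hknot : ∀ v, (hd.1, v) ∈ t → False := by
        intro v hv
        exact hnd.1 (List.mem_map.mpr ⟨(hd.1, v), hv, rfl⟩)
      constructor
      · intro hm
        rcases List.mem_cons.1 hm with he | hm'
        · exact Or.inr ⟨hd.2, List.mem_cons_self .., he⟩
        · have hne : kv.1 ≠ hd.1 := by
            intro he; exact hnd.1 (he ▸ List.mem_map.mpr ⟨kv, hm', rfl⟩)
          exact Or.inl ⟨hne, List.mem_cons_of_mem _ hm'⟩
      · rintro (⟨h1, hm⟩ | ⟨v, hv, he⟩)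
        · rcases List.mem_cons.1 hm with he | h2
          · exact absurd (by rw [he]) h1
          · exact List.mem_cons_of_mem _ h2
        · rcases List.mem_cons.1 hv with hvh | hvt
          · have : v = hd.2 := (congrArg Prod.snd hvh).symm ▸ rfl
            exact List.mem_cons.2 (Or.inl (by rw [he, ← congrArg Prod.snd hvh]))
          · exact absurd hvt (hknot v)
    · rw [hunf, if_neg h]
      constructor
      · intro hm
        rcases List.mem_cons.1 hm with he | hm'
        · exact Or.inl ⟨by rw [he]; exact h, he ▸ List.mem_cons_self ..⟩
        · rcases (ih hnd.2).1 hm' with ⟨h1, h2⟩ | ⟨v, hv, he⟩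
          · exact Or.inl ⟨h1, List.mem_cons_of_mem _ h2⟩
          · exact Or.inr ⟨v, List.mem_cons_of_mem _ hv, he⟩
      · rintro (⟨h1, hm⟩ | ⟨v, hv, he⟩)
        · rcases List.mem_cons.1 hm with he | h2
          · exact he ▸ List.mem_cons_self ..
          · exact List.mem_cons_of_mem _ ((ih hnd.2).2 (Or.inl ⟨h1, h2⟩))
        · rcases List.mem_cons.1 hv with hvh | hvt
          · exact absurd (by rw [← hvh]) h
          · exact List.mem_cons_of_mem _ ((ih hnd.2).2 (Or.inr ⟨v, hvt, he⟩))

theorem countP_or_split {α : Type} (l : List α) (f g : α → Bool)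
    (h : ∀ y ∈ l, ¬(f y = true ∧ g y = true)) :
    l.countP (fun y => f y || g y) = l.countP f + l.countP g := by
  induction l with
  | nil => simp
  | cons hd t ih =>
    have hh := h hd (List.mem_cons_self ..)
    have ht := ih (fun y hy => h y (List.mem_cons_of_mem _ hy))
    by_cases h1 : f hd <;> by_cases h2 : g hd <;>
      simp_all <;> omega

theorem union_merge {n : Int} {p lab : (Int × Int) → (Int × Int)}
    {mem : List ((Int × Int) × List (Int × Int))} {d : (Int × Int) → Nat}
    (hR : RootInv n p lab d) (hM : MemInv n lab mem)
    {a b : Int × Int} (ha : a ∈ pvCells n) (hb : b ∈ pvCells n) :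
    ∃ d', RootInv n (unionA (n.toNat * n.toNat + 1) p a b) (mergeB (lab, mem) a b).1 d' ∧
      MemInv n (mergeB (lab, mem) a b).1 (mergeB (lab, mem) a b).2 := by
  have hcntle : ∀ x : Int × Int,
      (pvCells n).countP (fun y => decide (lab y = lab x)) ≤ n.toNat * n.toNat := by
    intro x
    have := List.countP_le_length (l := pvCells n) (p := fun y => decide (lab y = lab x))
    rwa [length_pvCells] at this
  have hfa : d a < n.toNat * n.toNat + 1 := by
    have := (hR a ha).2.2.2.2.2.2.2; have := hcntle a; omega
  obtain ⟨hfa1, hR1⟩ := find_ok (n.toNat * n.toNat + 1) p a hR ha hfa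
  have hfb : d b < n.toNat * n.toNat + 1 := by
    have := (hR b hb).2.2.2.2.2.2.2; have := hcntle b; omega
  obtain ⟨hfb1, hR2⟩ := find_ok (n.toNat * n.toNat + 1) _ b hR1 hb hfb
  set q := (findA (n.toNat * n.toNat + 1) (findA (n.toNat * n.toNat + 1) p a).2 b).2 with hq
  by_cases heq : lab a = lab b
  · refine ⟨d, ?_, ?_⟩
    · simpa [unionA, mergeB, hfa1, hfb1, heq] using hR2
    · simpa [mergeB, heq] using hM
  · obtain ⟨hnd, hroots, hkeys, hcont⟩ := hM
    obtain ⟨kvb, hkvb, hkvb1⟩ : ∃ kv ∈ mem, kv.1 = lab b := by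
      rcases List.mem_map.1 (hkeys b hb) with ⟨kv, h1, h2⟩; exact ⟨kv, h1, h2⟩
    obtain ⟨kva, hkva, hkva1⟩ : ∃ kv ∈ mem, kv.1 = lab a := by
      rcases List.mem_map.1 (hkeys a ha) with ⟨kv, h1, h2⟩; exact ⟨kv, h1, h2⟩
    have hget : membGet mem (lab b) = kvb.2 := hkvb1 ▸ membGet_eq mem kvb hkvb hnd
    have hvb : ∀ y, y ∈ kvb.2 ↔ (y ∈ pvCells n ∧ lab y = lab b) := by
      intro y; rw [hcont kvb hkvb y, hkvb1]
    have humA : unionA (n.toNat * n.toNat + 1) p a b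
        = fun y => if y = lab b then lab a else q y := by
      simp [unionA, hfa1, hfb1, heq, hq]
    have humB : mergeB (lab, mem) a b
        = (kvb.2.foldl (fun f cell => fun y => if y = cell then lab a else f y) lab,
           membDel (membExtend mem (lab a) kvb.2) (lab b)) := by
      simp [mergeB, heq, hget]
    set Lab := (mergeB (lab, mem) a b).1 with hLabdef
    have hLab : ∀ y, Lab y = if y ∈ pvCells n ∧ lab y = lab b then lab a else lab y := by
      intro y
      rw [hLabdef, humB]
      simp only [relabel_fold]
      by_cases hy : y ∈ kvb.2
      · rw [if_pos hy, if_pos ((hvb y).1 hy)]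
      · rw [if_neg hy, if_neg (fun h => hy ((hvb y).2 h))]
    have hLab_lb : ∀ y ∈ pvCells n, lab y = lab b → Lab y = lab a := by
      intro y h1 h2; rw [hLab]; exact if_pos ⟨h1, h2⟩
    have hLab_ne : ∀ y, lab y ≠ lab b → Lab y = lab y := by
      intro y h1; rw [hLab]; exact if_neg (fun h => h1 h.2)
    have hlaC : lab a ∈ pvCells n := (hR a ha).2.2.2.1
    have hlbC : lab b ∈ pvCells n := (hR b hb).2.2.2.1
    have hlabla : lab (lab a) = lab a := (hR a ha).2.2.2.2.2.1
    have hlablb : lab (lab b) = lab b := (hR b hb).2.2.2.2.2.1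
    have hqla : q (lab a) = lab a := (hR2 a ha).2.2.2.2.1
    have hLabla : Lab (lab a) = lab a := by
      rw [hLab_ne _ (by rw [hlabla]; exact heq), hlabla]
    have hLablb : Lab (lab b) = lab a := hLab_lb _ hlbC hlablb
    have hdla : d (lab a) < (pvCells n).countP (fun y => decide (lab y = lab a)) := by
      have := (hR2 (lab a) hlaC).2.2.2.2.2.2.2; rwa [hlabla] at this
    have hdlb : d (lab b) < (pvCells n).countP (fun y => decide (lab y = lab b)) := by
      have := (hR2 (lab b) hlbC).2.2.2.2.2.2.2; rwa [hlablb] at this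
    have hcntsplit : (pvCells n).countP (fun y => decide (Lab y = lab a))
        = (pvCells n).countP (fun y => decide (lab y = lab a))
          + (pvCells n).countP (fun y => decide (lab y = lab b)) := by
      rw [← countP_or_split (pvCells n) _ _ (fun y _ h => heq ((of_decide_eq_true h.1).symm.trans (of_decide_eq_true h.2)))]
      apply List.countP_congr
      intro y hy
      simp only [Bool.or_eq_true, decide_eq_true_eq]
      by_cases h2 : lab y = lab b
      · rw [hLab_lb y hy h2]; simp [h2]
      · rw [hLab_ne y h2]; simp [h2]
    have hcnt_other : ∀ c, c ≠ lab a → c ≠ lab b →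
        (pvCells n).countP (fun y => decide (Lab y = c))
          = (pvCells n).countP (fun y => decide (lab y = c)) := by
      intro c h1 h2
      apply List.countP_congr
      intro y hy
      simp only [decide_eq_true_eq]
      by_cases h3 : lab y = lab b
      · rw [hLab_lb y hy h3, h3]
        constructor
        · intro h; exact absurd h.symm h1
        · intro h; exact absurd h.symm h2
      · rw [hLab_ne y h3]
    set d' : (Int × Int) → Nat :=
      fun y => if lab y = lab b then d y + d (lab a) + 1 else d y with hd'
    have hd'la : d' (lab a) = d (lab a) := by
      rw [hd']; simp only [hlabla]; exact if_neg heq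
    have hd'ne : ∀ y, lab y ≠ lab b → d' y = d y := by
      intro y h1; rw [hd']; exact if_neg h1
    have hd'lb : ∀ y, lab y = lab b → d' y = d y + d (lab a) + 1 := by
      intro y h1; rw [hd']; exact if_pos h1
    refine ⟨d', ?_, ?_⟩
    · -- RootInv for the union / relabel results
      rw [humA]
      intro z hz
      obtain ⟨h1, h2, h3, h4, h5, h6, h7, h8⟩ := hR2 z hz
      by_cases hzlb : z = lab b
      · have hPz : (fun y => if y = lab b then lab a else q y) z = lab a := if_pos hzlb
        have hlabz : lab z = lab b := by rw [hzlb, hlablb]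
        have hLz : Lab z = lab a := hLab_lb z hz hlabz
        refine ⟨?_, ?_, ?_, ?_, ?_, ?_, ?_, ?_⟩
        · rw [hPz]; exact hlaC
        · rw [hPz, hLabla, hLz]
        · intro h; rw [hPz] at h; exact absurd (h ▸ hzlb) heq
        · rw [hLz]; exact hlaC
        · rw [hLz]; show (if lab a = lab b then lab a else q (lab a)) = lab a
          rw [if_neg heq]; exact hqla
        · rw [hLz, hLabla]
        · intro _; rw [hPz, hd'la, hd'lb z hlabz]; omega
        · rw [hLz, hcntsplit, hd'lb z hlabz]
          have := hdlb; have h8' := h8; rw [hlabz] at h8'; omega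
      · have hPz : (fun y => if y = lab b then lab a else q y) z = q z := if_neg hzlb
        rw [hPz]
        by_cases hzb : lab z = lab b
        · have hLz : Lab z = lab a := hLab_lb z hz hzb
          have hlabqz : lab (q z) = lab b := by rw [h2, hzb]
          refine ⟨h1, ?_, ?_, ?_, ?_, ?_, ?_, ?_⟩
          · rw [hLab_lb (q z) h1 hlabqz, hLz]
          · intro h; have := h3 h; exact absurd (this ▸ hzb) hzlb
          · rw [hLz]; exact hlaC
          · rw [hLz]; show (if lab a = lab b then lab a else q (lab a)) = lab a
            rw [if_neg heq]; exact hqla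
          · rw [hLz, hLabla]
          · intro h; rw [hd'lb _ hlabqz, hd'lb _ hzb]; have := h7 h; omega
          · rw [hLz, hcntsplit, hd'lb _ hzb]
            have h8' := h8; rw [hzb] at h8'; omega
        · have hLz : Lab z = lab z := hLab_ne z hzb
          have hlabqz : lab (q z) ≠ lab b := by rw [h2]; exact hzb
          refine ⟨h1, ?_, ?_, ?_, ?_, ?_, ?_, ?_⟩
          · rw [hLab_ne (q z) hlabqz, hLz, h2]
          · intro h; rw [hLz]; exact h3 h
          · rw [hLz]; exact h4
          · rw [hLz]
            show (if lab z = lab b then lab a else q (lab z)) = lab z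
            rw [if_neg hzb]; exact h5
          · rw [hLz, hLab_ne (lab z) (by rw [h6]; exact hzb), h6]
          · intro h; rw [hd'ne _ hlabqz, hd'ne _ hzb]; exact h7 h
          · rw [hd'ne _ hzb, hLz]
            by_cases hza : lab z = lab a
            · rw [hza, hcntsplit]
              have h8' := h8; rw [hza] at h8'; omega
            · rw [hcnt_other (lab z) hza hzb]; exact h8
    · -- MemInv for the relabel result
      have hmem2 : (mergeB (lab, mem) a b).2
          = membDel (membExtend mem (lab a) kvb.2) (lab b) := by rw [humB]
      have hndext : ((membExtend mem (lab a) kvb.2).map Prod.fst).Nodup := by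
        rw [map_fst_membExtend]; exact hnd
      have hkeys' : ((mergeB (lab, mem) a b).2.map Prod.fst)
          = (mem.map Prod.fst).erase (lab b) := by
        rw [hmem2, map_fst_membDel, map_fst_membExtend]
      have hmemchar : ∀ kv, kv ∈ (mergeB (lab, mem) a b).2 ↔
          ((kv.1 ≠ lab a ∧ kv.1 ≠ lab b ∧ kv ∈ mem) ∨
           ∃ v, (lab a, v) ∈ mem ∧ kv = (lab a, v ++ kvb.2)) := by
        intro kv
        rw [hmem2, mem_membDel_iff hndext, mem_membExtend_iff hnd]
        constructor
        · rintro ⟨⟨h1, h2⟩ | ⟨v, hv, rfl⟩, h3⟩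
          · exact Or.inl ⟨h1, h3, h2⟩
          · exact Or.inr ⟨v, hv, rfl⟩
        · rintro (⟨h1, h2, h3⟩ | ⟨v, hv, rfl⟩)
          · exact ⟨Or.inl ⟨h1, h3⟩, h2⟩
          · exact ⟨Or.inr ⟨v, hv, rfl⟩, heq⟩
      refine ⟨?_, ?_, ?_, ?_⟩
      · rw [hkeys']; exact hnd.erase _
      · intro kv hkv
        rcases (hmemchar kv).1 hkv with ⟨h1, h2, h3⟩ | ⟨v, hv, rfl⟩
        · obtain ⟨hc, hr⟩ := hroots kv h3
          exact ⟨hc, by rw [hLab_ne kv.1 (by rw [hr]; exact h2), hr]⟩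
        · exact ⟨hlaC, hLabla⟩
      · intro x hx
        rw [hkeys', hnd.mem_erase_iff]
        by_cases hxb : lab x = lab b
        · rw [hLab_lb x hx hxb]
          exact ⟨heq, List.mem_map.2 ⟨kva, hkva, hkva1⟩⟩
        · rw [hLab_ne x hxb]
          exact ⟨hxb, hkeys x hx⟩
      · intro kv hkv y
        rcases (hmemchar kv).1 hkv with ⟨h1, h2, h3⟩ | ⟨v, hv, rfl⟩
        · rw [hcont kv h3 y]
          constructor
          · rintro ⟨hc, hl⟩
            exact ⟨hc, by rw [hLab_ne y (by rw [hl]; exact h2), hl]⟩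
          · rintro ⟨hc, hl⟩
            refine ⟨hc, ?_⟩
            by_cases h3' : lab y = lab b
            · rw [hLab_lb y hc h3'] at hl; exact absurd hl.symm h1
            · rw [hLab_ne y h3'] at hl; exact hl
        · simp only [List.mem_append]
          rw [hcont (lab a, v) hv y, hvb y]
          constructor
          · rintro (⟨hc, hl⟩ | ⟨hc, hl⟩)
            · exact ⟨hc, by rw [hLab_ne y (by rw [hl]; exact heq), hl]⟩
            · exact ⟨hc, hLab_lb y hc hl⟩
          · rintro ⟨hc, hl⟩
            by_cases h3' : lab y = lab b
            · exact Or.inr ⟨hc, h3'⟩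
            · rw [hLab_ne y h3'] at hl; exact Or.inl ⟨hc, hl⟩

theorem step_ok {n : Int} (h_thick v_thick : List (Int × Int × Bool))
    {p lab : (Int × Int) → (Int × Int)} {mem : List ((Int × Int) × List (Int × Int))}
    {d : (Int × Int) → Nat} (hR : RootInv n p lab d) (hM : MemInv n lab mem)
    {rc : Int × Int} (hrc : rc ∈ pvCells n) :
    ∃ d', RootInv n (stepA n h_thick v_thick (n.toNat * n.toNat + 1) p rc)
        (stepB n h_thick v_thick (lab, mem) rc).1 d' ∧
      MemInv n (stepB n h_thick v_thick (lab, mem) rc).1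
        (stepB n h_thick v_thick (lab, mem) rc).2 := by
  obtain ⟨hr1, hr2, hc1, hc2⟩ := mem_pvCells.1 hrc
  have hmk : ((rc.1, rc.2) : Int × Int) = rc := rfl
  by_cases c1 : rc.2 + 1 < n ∧ thickGet v_thick rc.1 (rc.2 + 1) = false
  · have hb1 : ((rc.1, rc.2 + 1) : Int × Int) ∈ pvCells n :=
      mem_pvCells.2 ⟨hr1, hr2, by omega, c1.1⟩
    obtain ⟨d1, hR1, hM1⟩ := union_merge hR hM (hmk ▸ hrc) hb1
    by_cases c2 : rc.1 + 1 < n ∧ thickGet h_thick (rc.1 + 1) rc.2 = false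
    · have hb2 : ((rc.1 + 1, rc.2) : Int × Int) ∈ pvCells n :=
        mem_pvCells.2 ⟨by omega, c2.1, hc1, hc2⟩
      obtain ⟨d2, hR2, hM2⟩ := union_merge hR1 hM1 (hmk ▸ hrc) hb2
      refine ⟨d2, ?_, ?_⟩ <;> simp only [stepA, stepB, if_pos c1, if_pos c2]
      · exact hR2
      · exact ⟨hM2.1, hM2.2.1, hM2.2.2.1, hM2.2.2.2⟩
    · refine ⟨d1, ?_, ?_⟩ <;> simp only [stepA, stepB, if_pos c1, if_neg c2]
      · exact hR1
      · exact hM1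
  · by_cases c2 : rc.1 + 1 < n ∧ thickGet h_thick (rc.1 + 1) rc.2 = false
    · have hb2 : ((rc.1 + 1, rc.2) : Int × Int) ∈ pvCells n :=
        mem_pvCells.2 ⟨by omega, c2.1, hc1, hc2⟩
      obtain ⟨d2, hR2, hM2⟩ := union_merge hR hM (hmk ▸ hrc) hb2
      refine ⟨d2, ?_, ?_⟩ <;> simp only [stepA, stepB, if_neg c1, if_pos c2]
      · exact hR2
      · exact hM2
    · refine ⟨d, ?_, ?_⟩ <;> simp only [stepA, stepB, if_neg c1, if_neg c2]
      · exact hR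
      · exact hM

theorem phase1_ok {n : Int} (h_thick v_thick : List (Int × Int × Bool)) :
    ∀ (l : List (Int × Int)) (p lab : (Int × Int) → (Int × Int))
      (mem : List ((Int × Int) × List (Int × Int))) (d : (Int × Int) → Nat),
      (∀ x ∈ l, x ∈ pvCells n) → RootInv n p lab d → MemInv n lab mem →
      ∃ d', RootInv n (l.foldl (stepA n h_thick v_thick (n.toNat * n.toNat + 1)) p)
              (l.foldl (stepB n h_thick v_thick) (lab, mem)).1 d' ∧
            MemInv n (l.foldl (stepB n h_thick v_thick) (lab, mem)).1
              (l.foldl (stepB n h_thick v_thick) (lab, mem)).2 := by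
  intro l
  induction l with
  | nil => intro p lab mem d _ hR hM; exact ⟨d, hR, hM⟩
  | cons hd t ih =>
    intro p lab mem d hsub hR hM
    obtain ⟨d1, hR1, hM1⟩ := step_ok h_thick v_thick hR hM (hsub hd (List.mem_cons_self ..))
    simp only [List.foldl_cons]
    exact ih _ _ _ d1 (fun x hx => hsub x (List.mem_cons_of_mem _ hx)) hR1 hM1

theorem phase2_ok {n : Int} {lab : (Int × Int) → (Int × Int)} {d : (Int × Int) → Nat} :
    ∀ (l : List (Int × Int)) (p : (Int × Int) → (Int × Int))
      (gs : List ((Int × Int) × List (Int × Int))),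
      (∀ x ∈ l, x ∈ pvCells n) → RootInv n p lab d →
      (l.foldl (fun (s : List ((Int × Int) × List (Int × Int)) × ((Int × Int) → (Int × Int))) x =>
          let r := findA (n.toNat * n.toNat + 1) s.2 x
          (pushGroup s.1 r.1 x, r.2)) (gs, p)).1
        = l.foldl (fun gs x => pushGroup gs (lab x) x) gs := by
  intro l
  induction l with
  | nil => intro p gs _ _; rfl
  | cons hd t ih =>
    intro p gs hsub hR
    have hhd := hsub hd (List.mem_cons_self ..)
    have hfuel : d hd < n.toNat * n.toNat + 1 := by
      have h8 := (hR hd hhd).2.2.2.2.2.2.2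
      have := List.countP_le_length (l := pvCells n) (p := fun y => decide (lab y = lab hd))
      rw [length_pvCells] at this
      omega
    obtain ⟨hf1, hR1⟩ := find_ok (n.toNat * n.toNat + 1) p hd hR hhd hfuel
    simp only [List.foldl_cons, hf1]
    exact ih _ _ (fun x hx => hsub x (List.mem_cons_of_mem _ hx)) hR1

theorem init_root (n : Int) : RootInv n (fun y => y) (fun y => y) (fun _ => 0) := by
  intro x hx
  refine ⟨hx, rfl, fun _ => rfl, hx, rfl, rfl, fun h => absurd rfl h, ?_⟩
  exact List.countP_pos_iff.2 ⟨x, hx, by simp⟩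

theorem init_mem (n : Int) : MemInv n (fun y => y) ((pvCells n).map (fun x => (x, [x]))) := by
  have hmapid : List.map (Prod.fst ∘ fun x : Int × Int => (x, [x])) (pvCells n) = pvCells n :=
    List.map_id'' (congrFun rfl) _
  refine ⟨?_, ?_, ?_, ?_⟩
  · rw [List.map_map, hmapid]
    exact nodup_pvCells n
  · intro kv hkv
    rcases List.mem_map.1 hkv with ⟨x, hx, rfl⟩
    exact ⟨hx, rfl⟩
  · intro x hx
    rw [List.map_map, hmapid]
    exact hx
  · intro kv hkv y
    rcases List.mem_map.1 hkv with ⟨x, hx, rfl⟩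
    simp only [List.mem_singleton]
    constructor
    · rintro rfl; exact ⟨hx, rfl⟩
    · rintro ⟨_, rfl⟩; rfl

theorem ports_eq : ∀ (n : Int) (h_thick v_thick : List (Int × Int × Bool)),
    group_cages_py n h_thick v_thick = group_cages_py_alt n h_thick v_thick := by
  intro n h_thick v_thick
  rw [group_cages_py, group_cages_py_alt]
  obtain ⟨d1, hR1, hM1⟩ := phase1_ok h_thick v_thick (pvCells n)
    (fun y => y) (fun y => y) ((pvCells n).map (fun x => (x, [x]))) (fun _ => 0)
    (fun x hx => hx) (init_root n) (init_mem n)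
  rw [phase2_ok (pvCells n) _ [] (fun x hx => hx) hR1]

-- ===== VERDICT (by name: the statement is the Claim_ definition above) =====
theorem group_cages_py_spec : Claim_equal_group_cages_py := by
  intro n h_thick v_thick _
  unfold Spec_group_cages_py
  exact ports_eq n h_thick v_thick
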